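-- pv_equiv track=rewrite | github.com/ZBeimnet/competitiveProgramming | Week-06/Day-25/AsFarFromLandAsPossible.py | bfs
-- ===== SOURCE A (Python) =====
-- from collections import deque
--
-- def bfs(point, grid):
--     neighbours = [(1, 0), (-1, 0), (0, 1), (0, -1)]
--     queue = deque([point])
--     visited = set([point])
--
--     while queue:
--         x, y = queue.popleft()
--         # if land found (since this is bfs it is the nearest land)
--         if grid[x][y]:
--             return abs(x - point[0]) + abs(y - point[1])
--
--         for neighbour in neighbours:
--             curr_x = x + neighbour[0]
--             curr_y = y + neighbour[1]
--             if 0 <= curr_y < len(grid) and \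
--                     0 <= curr_x < len(grid) and \
--                     (curr_x, curr_y) not in visited:
--                 queue.append((curr_x, curr_y))
--                 visited.add((curr_x, curr_y))
--
--     return -1
-- ===== SOURCE B (Python) =====
-- def bfs(point, grid):
--     # If the start cell (as A reads it) is land, the answer is 0.
--     if grid[point[0]][point[1]]:
--         return 0
--     # Otherwise: with no obstacles, BFS distance equals Manhattan distance, so the
--     # answer is the minimum |x-px|+|y-py| over land cells of the n x n box (-1 if none).
--     n = len(grid)
--     best = -1
--     for x in range(n):
--         for y in range(n):
--             if grid[x][y]:
--                 d = abs(x - point[0]) + abs(y - point[1])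
--                 if best == -1 or d < best:
--                     best = d
--     return best
-- ===== Notes on version B (the rewrite author's own statement) =====
-- stated objective: simpler
-- what changed: Replaced the BFS with queue/visited structures by a start-cell check (land at the start means distance 0) plus a direct min-scan of the n x n box: with no obstacles BFS distance equals Manhattan distance, so the answer is the minimum |x-px|+|y-py| over land cells (-1 if none).
-- outside the precondition, e.g. on bfs((-2, 0), [[0, 1], [1, 1]]): A returns -1, B returns 3; on bfs((-1, -1), [[0, 1], [1, 0]]): A returns -1, B returns 3; on bfs((0, 0), [[0, 1], [1]]): A returns 1, B raises IndexError
import Mathlib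
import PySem

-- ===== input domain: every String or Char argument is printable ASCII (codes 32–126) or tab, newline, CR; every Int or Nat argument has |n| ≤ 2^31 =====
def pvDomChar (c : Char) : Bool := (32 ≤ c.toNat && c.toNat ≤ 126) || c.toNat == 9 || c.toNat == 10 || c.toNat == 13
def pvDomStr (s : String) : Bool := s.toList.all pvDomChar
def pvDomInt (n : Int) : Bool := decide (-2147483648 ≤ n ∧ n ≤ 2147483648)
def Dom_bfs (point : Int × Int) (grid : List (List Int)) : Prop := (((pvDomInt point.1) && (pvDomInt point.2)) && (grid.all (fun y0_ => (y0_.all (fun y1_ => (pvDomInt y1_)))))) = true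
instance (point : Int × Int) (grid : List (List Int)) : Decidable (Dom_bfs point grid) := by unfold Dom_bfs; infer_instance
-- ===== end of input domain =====

-- B replaces A's BFS (queue + visited set) by a direct minimum scan of the n×n box:
-- with no obstacles the BFS distance is the Manhattan distance, so the answer is the
-- minimum |x-px|+|y-py| over land cells (-1 if there is none).  Objective: simpler.

-- ===== PORT A =====
-- cells inside the n×n box A's bounds check admits (also used by Pre_ and the proofs)
def inBox (grid : List (List Int)) (c : Int × Int) : Prop :=
  0 ≤ c.1 ∧ c.1 < (grid.length : Int) ∧ 0 ≤ c.2 ∧ c.2 < (grid.length : Int)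

-- the box as a Finset, used only for bfsLoop's termination measure
def boxFinset (n : Nat) : Finset (Int × Int) :=
  (Finset.range n ×ˢ Finset.range n).image (fun p => ((p.1 : Int), (p.2 : Int)))

theorem mem_boxFinset (grid : List (List Int)) (c : Int × Int) :
    c ∈ boxFinset grid.length ↔ inBox grid c := by
  simp only [boxFinset, Finset.mem_image, Finset.mem_product, Finset.mem_range, inBox]
  constructor
  · rintro ⟨⟨a, b⟩, ⟨ha, hb⟩, rfl⟩
    refine ⟨by omega, by omega, by omega, by omega⟩
  · rintro ⟨h1, h2, h3, h4⟩
    refine ⟨(c.1.toNat, c.2.toNat), ⟨by omega, by omega⟩, ?_⟩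
    ext <;> simp <;> omega

-- body of A's inner `for neighbour in neighbours` loop
def bfsStep (grid : List (List Int)) (x y : Int)
    (s : List (Int × Int) × PySem.Set (Int × Int)) (nb : Int × Int) :
    List (Int × Int) × PySem.Set (Int × Int) :=
  let cx := x + nb.1
  let cy := y + nb.2
  if 0 ≤ cy ∧ cy < (grid.length : Int) ∧ 0 ≤ cx ∧ cx < (grid.length : Int) ∧ (cx, cy) ∉ s.2 then
    (s.1 ++ [(cx, cy)], PySem.Set.add s.2 (cx, cy))
  else s

-- what one pass of the neighbour loop does (cited by bfsLoop's decreasing_by and by the proofs)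
theorem foldStep_spec (grid : List (List Int)) (x y : Int) :
    ∀ (nbs : List (Int × Int)) (q v : List (Int × Int)),
    ∃ news : List (Int × Int),
      nbs.foldl (bfsStep grid x y) (q, v) = (q ++ news, v ++ news) ∧
      news.Nodup ∧
      (∀ c ∈ news, c ∉ v ∧ inBox grid c ∧ ∃ nb ∈ nbs, c = (x + nb.1, y + nb.2)) ∧
      (∀ nb ∈ nbs, inBox grid (x + nb.1, y + nb.2) → (x + nb.1, y + nb.2) ∈ v ++ news) := by
  intro nbs
  induction nbs with
  | nil => intro q v; exact ⟨[], by simp, by simp, by simp, by simp⟩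
  | cons nb nbs ih =>
    intro q v
    by_cases hC : 0 ≤ y + nb.2 ∧ y + nb.2 < (grid.length : Int) ∧ 0 ≤ x + nb.1 ∧
        x + nb.1 < (grid.length : Int) ∧ (x + nb.1, y + nb.2) ∉ v
    · have hstep : bfsStep grid x y (q, v) nb =
          (q ++ [(x + nb.1, y + nb.2)], v ++ [(x + nb.1, y + nb.2)]) := by
        simp only [bfsStep]
        rw [if_pos hC, PySem.Set.add_of_not_mem hC.2.2.2.2]
      obtain ⟨news, h1, h2, h3, h4⟩ := ih (q ++ [(x + nb.1, y + nb.2)]) (v ++ [(x + nb.1, y + nb.2)])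
      refine ⟨(x + nb.1, y + nb.2) :: news, ?_, ?_, ?_, ?_⟩
      · rw [List.foldl_cons, hstep, h1]
        simp [List.append_assoc]
      · refine List.nodup_cons.mpr ⟨fun hmem => ?_, h2⟩
        have := (h3 _ hmem).1
        simp at this
      · intro c hc
        rcases List.mem_cons.mp hc with rfl | hc'
        · exact ⟨hC.2.2.2.2, ⟨hC.2.2.1, hC.2.2.2.1, hC.1, hC.2.1⟩, nb, List.mem_cons_self .., rfl⟩
        · obtain ⟨hnv, hbox, nb', hnb', heq⟩ := h3 c hc'
          exact ⟨fun hv => hnv (by simp [hv]), hbox, nb', List.mem_cons_of_mem _ hnb', heq⟩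
      · intro nb' hnb' hbox
        rcases List.mem_cons.mp hnb' with rfl | hnb''
        · simp
        · have := h4 nb' hnb'' hbox
          simpa [List.append_assoc] using this
    · have hstep : bfsStep grid x y (q, v) nb = (q, v) := by
        simp only [bfsStep]
        rw [if_neg hC]
      obtain ⟨news, h1, h2, h3, h4⟩ := ih q v
      refine ⟨news, by rw [List.foldl_cons, hstep, h1], h2,
        fun c hc => (h3 c hc).imp_right (fun h => h.imp_right
          (fun ⟨nb2, hnb2, he⟩ => ⟨nb2, List.mem_cons_of_mem _ hnb2, he⟩)), ?_⟩
      intro nb' hnb' hbox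
      rcases List.mem_cons.mp hnb' with rfl | hnb''
      · have hv : (x + nb'.1, y + nb'.2) ∈ v := by
          by_contra hv
          exact hC ⟨hbox.2.2.1, hbox.2.2.2, hbox.1, hbox.2.1, hv⟩
        simp [hv]
      · exact h4 nb' hnb'' hbox

-- counting lemma behind the termination measure
theorem card_sdiff_append (S : Finset (Int × Int)) (v news : List (Int × Int))
    (hnd : news.Nodup) (hnv : ∀ c ∈ news, c ∉ v) (hS : ∀ c ∈ news, c ∈ S) :
    (S \ (v ++ news).toFinset).card + news.length = (S \ v.toFinset).card := by
  have hsub : news.toFinset ⊆ S \ v.toFinset := by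
    intro c hc
    rw [List.mem_toFinset] at hc
    exact Finset.mem_sdiff.mpr ⟨hS c hc, fun hm => hnv c hc (List.mem_toFinset.mp hm)⟩
  have hu : (v ++ news).toFinset = v.toFinset ∪ news.toFinset := by simp
  rw [hu, ← Finset.sup_eq_union, ← sdiff_sdiff, ← List.toFinset_card_of_nodup hnd]
  exact Finset.card_sdiff_add_card_eq_card hsub

-- A's `while queue:` loop
def bfsLoop (point : Int × Int) (grid : List (List Int))
    (queue : List (Int × Int)) (visited : PySem.Set (Int × Int)) : Int :=
  match queue with
  | [] => -1
  | (x, y) :: rest =>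
    if (PySem.List.pyGet? ((PySem.List.pyGet? grid x).getD []) y).getD 0 ≠ 0 then
      ((x - point.1).natAbs : Int) + ((y - point.2).natAbs : Int)
    else
      let s := [((1 : Int), (0 : Int)), (-1, 0), (0, 1), (0, -1)].foldl (bfsStep grid x y)
        (rest, visited)
      bfsLoop point grid s.1 s.2
termination_by 2 * ((boxFinset grid.length) \ visited.toFinset).card + queue.length
decreasing_by
  obtain ⟨news, hfold, hnd, hmem, -⟩ :=
    foldStep_spec grid x y [((1 : Int), (0 : Int)), (-1, 0), (0, 1), (0, -1)] rest visited
  have hcard := card_sdiff_append (boxFinset grid.length) visited news hnd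
    (fun c hc => (hmem c hc).1)
    (fun c hc => (mem_boxFinset grid c).mpr (hmem c hc).2.1)
  rw [hfold]
  simp only [List.length_append, List.length_cons]
  omega

def bfs (point : Int × Int) (grid : List (List Int)) : Int :=
  bfsLoop point grid [point] (PySem.Set.ofList [point])

-- ===== PORT B =====
def bfs_alt (point : Int × Int) (grid : List (List Int)) : Int :=
  if (PySem.List.pyGet? ((PySem.List.pyGet? grid point.1).getD []) point.2).getD 0 ≠ 0 then 0
  else
    let n : Int := grid.length
    (PySem.List.pyRange 0 n 1).foldl (fun best x =>
      (PySem.List.pyRange 0 n 1).foldl (fun best y =>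
        if (PySem.List.pyGet? ((PySem.List.pyGet? grid x).getD []) y).getD 0 ≠ 0 then
          let d := ((x - point.1).natAbs : Int) + ((y - point.2).natAbs : Int)
          if best = -1 ∨ d < best then d else best
        else best) best) (-1)

-- ===== PRECONDITION & SPEC =====
-- Pre_ admits every input where the start read grid[point[0]][point[1]] is land (A answers 0
-- at its first pop), and water starts whose coordinates are ≥ -1 and < n with at least one
-- ≥ 0, on square-or-wider grids (rows of length ≥ n, so A's BFS never reads outside a row).
-- Excluded: water starts further outside the box — there A either raises IndexError or, via
-- Python's negative-index wraparound, returns -1 without searching, a corner the function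
-- (whose own bounds check assumes 0 ≤ coordinate < n) was never meant for — and ragged
-- grids with a water start, on which A can raise IndexError mid-BFS.
def Pre_bfs (point : Int × Int) (grid : List (List Int)) : Prop :=
  (PySem.List.pyGet? ((PySem.List.pyGet? grid point.1).getD []) point.2).getD 0 ≠ 0 ∨
  (-1 ≤ point.1 ∧ point.1 < (grid.length : Int) ∧
   -1 ≤ point.2 ∧ point.2 < (grid.length : Int) ∧
   (0 ≤ point.1 ∨ 0 ≤ point.2) ∧
   ∀ row ∈ grid, grid.length ≤ row.length)

instance (point : Int × Int) (grid : List (List Int)) : Decidable (Pre_bfs point grid) := by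
  unfold Pre_bfs; infer_instance

def pvWitness_bfs : (Int × Int) × List (List Int) := ((0, 0), [[1]])

def Spec_bfs (point : Int × Int) (grid : List (List Int)) (out : Int) : Prop := out = bfs_alt point grid
instance (point : Int × Int) (grid : List (List Int)) (out : Int) : Decidable (Spec_bfs point grid out) := by unfold Spec_bfs; infer_instance

-- ===== CLAIM (what is proved, stated in full; the proofs are below) =====
def Claim_equal_bfs : Prop := ∀ (point : Int × Int) (grid : List (List Int)), Dom_bfs point grid → Pre_bfs point grid → Spec_bfs point grid (bfs point grid)

-- ===== LEMMAS AND PROOFS =====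

-- Manhattan distance, as both ports compute it
def mdist (p c : Int × Int) : Int :=
  ((c.1 - p.1).natAbs : Int) + ((c.2 - p.2).natAbs : Int)

-- the cell value grid[x][y], as both ports read it
def gval (grid : List (List Int)) (c : Int × Int) : Int :=
  (PySem.List.pyGet? ((PySem.List.pyGet? grid c.1).getD []) c.2).getD 0

-- the 4-neighbour relation of A's `neighbours` list
def adj (c z : Int × Int) : Prop :=
  z = (c.1 + 1, c.2) ∨ z = (c.1 - 1, c.2) ∨ z = (c.1, c.2 + 1) ∨ z = (c.1, c.2 - 1)

theorem mdist_nonneg (p c : Int × Int) : 0 ≤ mdist p c := by unfold mdist; positivity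

theorem mdist_eq_zero (p c : Int × Int) : mdist p c = 0 ↔ c = p := by
  unfold mdist
  constructor
  · intro h; ext <;> omega
  · rintro rfl; omega

theorem adj_symm {c z : Int × Int} (h : adj c z) : adj z c := by
  obtain ⟨a, b⟩ := c; obtain ⟨u, v⟩ := z
  unfold adj at *
  simp only [Prod.mk.injEq] at *
  omega

theorem adj_mdist (p : Int × Int) {c z : Int × Int} (h : adj c z) :
    mdist p z = mdist p c + 1 ∨ mdist p z = mdist p c - 1 := by
  rcases h with rfl | rfl | rfl | rfl <;> (unfold mdist; simp only []; omega)

-- start points A's BFS effectively searches the box from (Pre_'s in-box start is one)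
def startOK (grid : List (List Int)) (p : Int × Int) : Prop :=
  -1 ≤ p.1 ∧ p.1 < (grid.length : Int) ∧ -1 ≤ p.2 ∧ p.2 < (grid.length : Int) ∧
    (0 ≤ p.1 ∨ 0 ≤ p.2)

-- from a box cell at distance ≥ 2 there is a box neighbour one step closer to p
theorem toward (grid : List (List Int)) (p : Int × Int) (hp : startOK grid p)
    {c : Int × Int} (hc : inBox grid c) (hd : 2 ≤ mdist p c) :
    ∃ z, adj c z ∧ inBox grid z ∧ mdist p z = mdist p c - 1 := by
  obtain ⟨hp1, hp2, hp3, hp4, hp5⟩ := hp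
  obtain ⟨hc1, hc2, hc3, hc4⟩ := hc
  by_cases h1 : p.1 < c.1
  · by_cases h1' : 1 ≤ c.1
    · exact ⟨(c.1 - 1, c.2), Or.inr (Or.inl rfl), ⟨by omega, by omega, hc3, hc4⟩,
        by unfold mdist at *; simp only [] at *; omega⟩
    · -- c.1 = 0 and p.1 = -1, so 0 ≤ p.2 and c.2 ≠ p.2
      by_cases h3 : p.2 < c.2
      · exact ⟨(c.1, c.2 - 1), Or.inr (Or.inr (Or.inr rfl)), ⟨hc1, hc2, by omega, by omega⟩,
          by unfold mdist at *; simp only [] at *; omega⟩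
      · exact ⟨(c.1, c.2 + 1), Or.inr (Or.inr (Or.inl rfl)), ⟨hc1, hc2, by omega, by
            unfold mdist at *; simp only [] at *; omega⟩,
          by unfold mdist at *; simp only [] at *; omega⟩
  · by_cases h2 : c.1 < p.1
    · exact ⟨(c.1 + 1, c.2), Or.inl rfl, ⟨by omega, by omega, hc3, hc4⟩,
        by unfold mdist at *; simp only [] at *; omega⟩
    · by_cases h3 : p.2 < c.2
      · exact ⟨(c.1, c.2 - 1), Or.inr (Or.inr (Or.inr rfl)), ⟨hc1, hc2, by
            unfold mdist at *; simp only [] at *; omega, by omega⟩,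
          by unfold mdist at *; simp only [] at *; omega⟩
      · by_cases h4 : c.2 < p.2
        · exact ⟨(c.1, c.2 + 1), Or.inr (Or.inr (Or.inl rfl)), ⟨hc1, hc2, by omega, by
              unfold mdist at *; simp only [] at *; omega⟩,
            by unfold mdist at *; simp only [] at *; omega⟩
        · exfalso; unfold mdist at hd; omega

theorem exists_at_dist (grid : List (List Int)) (p : Int × Int) (hp : startOK grid p)
    {c : Int × Int} (hc : inBox grid c) :
    ∀ j : Int, 2 ≤ j → j ≤ mdist p c → ∃ c', inBox grid c' ∧ mdist p c' = j := by
  have H : ∀ k : Nat, ∀ c : Int × Int, inBox grid c → (mdist p c).toNat = k →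
      ∀ j : Int, 2 ≤ j → j ≤ mdist p c → ∃ c', inBox grid c' ∧ mdist p c' = j := by
    intro k
    induction k using Nat.strong_induction_on with
    | _ k ih =>
      intro c hc hk j hj hjle
      by_cases he : mdist p c = j
      · exact ⟨c, hc, he⟩
      · obtain ⟨z, -, hz2, hz3⟩ := toward grid p hp hc (by omega)
        exact ih (mdist p z).toNat (by omega) z hz2 rfl j hj (by omega)
  exact H (mdist p c).toNat c hc rfl

-- ===== B-side characterization: bfs_alt is the minimum Manhattan distance to land =====

def gstep (point : Int × Int) (grid : List (List Int)) (b : Int) (c : Int × Int) : Int :=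
  if gval grid c ≠ 0 then
    let d := mdist point c
    if b = -1 ∨ d < b then d else b
  else b

def cells (grid : List (List Int)) : List (Int × Int) :=
  (PySem.List.pyRange 0 (grid.length : Int) 1).flatMap
    (fun x => (PySem.List.pyRange 0 (grid.length : Int) 1).map (fun y => (x, y)))

theorem foldl_foldl_flatMap {α β γ : Type} (xs : List α) (ys : α → List β)
    (g : γ → α × β → γ) (init : γ) :
    xs.foldl (fun b x => (ys x).foldl (fun b y => g b (x, y)) b) init
      = (xs.flatMap (fun x => (ys x).map (fun y => (x, y)))).foldl g init := by
  induction xs generalizing init with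
  | nil => rfl
  | cons x xs ih => simp [List.foldl_append, List.foldl_map, ih]

theorem mem_cells (grid : List (List Int)) (c : Int × Int) :
    c ∈ cells grid ↔ inBox grid c := by
  simp only [cells, List.mem_flatMap, List.mem_map, PySem.List.mem_pyRange_one, inBox]
  constructor
  · rintro ⟨x, hx, y, hy, rfl⟩
    exact ⟨hx.1, hx.2, hy.1, hy.2⟩
  · rintro ⟨h1, h2, h3, h4⟩
    exact ⟨c.1, ⟨h1, h2⟩, c.2, ⟨h3, h4⟩, rfl⟩

def altMin (point : Int × Int) (grid : List (List Int)) : Int :=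
  (cells grid).foldl (gstep point grid) (-1)

-- B's min-scan branch (start cell water) computes altMin
theorem alt_eq_water (point : Int × Int) (grid : List (List Int))
    (h : gval grid point = 0) : bfs_alt point grid = altMin point grid := by
  unfold bfs_alt altMin
  rw [show (PySem.List.pyGet? ((PySem.List.pyGet? grid point.1).getD []) point.2).getD 0
      = gval grid point from rfl, if_neg (by simp [h])]
  exact foldl_foldl_flatMap (PySem.List.pyRange 0 ((grid.length : Nat) : Int) 1)
    (fun _ => PySem.List.pyRange 0 ((grid.length : Nat) : Int) 1) (gstep point grid) (-1)

theorem foldl_gstep_spec (point : Int × Int) (grid : List (List Int)) :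
    ∀ (L : List (Int × Int)) (b : Int), b = -1 ∨ 0 ≤ b →
      (L.foldl (gstep point grid) b = b ∨
        ∃ c ∈ L, gval grid c ≠ 0 ∧ L.foldl (gstep point grid) b = mdist point c) ∧
      (∀ c ∈ L, gval grid c ≠ 0 → L.foldl (gstep point grid) b ≤ mdist point c) ∧
      (b ≠ -1 → L.foldl (gstep point grid) b ≤ b) ∧
      (L.foldl (gstep point grid) b = -1 → b = -1 ∧ ∀ c ∈ L, gval grid c = 0) := by
  intro L
  induction L with
  | nil => intro b hb; exact ⟨Or.inl rfl, by simp, fun _ => le_refl _, fun h => ⟨h, by simp⟩⟩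
  | cons c L ih =>
    intro b hb
    by_cases hv : gval grid c ≠ 0
    · have hd0 : 0 ≤ mdist point c := mdist_nonneg point c
      have hstep : gstep point grid b c =
          if b = -1 ∨ mdist point c < b then mdist point c else b := by
        simp only [gstep, if_pos hv]
      set b' := if b = -1 ∨ mdist point c < b then mdist point c else b with hb'
      have hb'0 : 0 ≤ b' := by rw [hb']; split_ifs <;> omega
      have hb'le : b' ≤ mdist point c := by rw [hb']; split_ifs <;> omega
      have hb'b : b ≠ -1 → b' ≤ b := by rw [hb']; split_ifs <;> omega
      have hb'src : b' = mdist point c ∨ b' = b := by rw [hb']; split_ifs <;> simp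
      obtain ⟨ih1, ih2, ih3, ih4⟩ := ih b' (Or.inr hb'0)
      rw [List.foldl_cons, hstep]
      set r := L.foldl (gstep point grid) b' with hr
      have hrb' : r ≤ b' := ih3 (by omega)
      refine ⟨?_, ?_, ?_, ?_⟩
      · rcases ih1 with h | ⟨c', hc', hv', he⟩
        · rcases hb'src with h2 | h2
          · exact Or.inr ⟨c, List.mem_cons_self .., hv, by omega⟩
          · exact Or.inl (by omega)
        · exact Or.inr ⟨c', List.mem_cons_of_mem _ hc', hv', he⟩
      · intro c' hc' hv'
        rcases List.mem_cons.mp hc' with rfl | hc''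
        · omega
        · exact ih2 c' hc'' hv'
      · intro hbne
        have := hb'b hbne
        omega
      · intro hr1
        exact absurd (ih4 hr1).1 (by omega)
    · simp only [gstep, if_neg hv, List.foldl_cons]
      obtain ⟨ih1, ih2, ih3, ih4⟩ := ih b hb
      refine ⟨?_, ?_, ih3, ?_⟩
      · rcases ih1 with h | ⟨c', hc', hv', he⟩
        · exact Or.inl h
        · exact Or.inr ⟨c', List.mem_cons_of_mem _ hc', hv', he⟩
      · intro c' hc' hv'
        rcases List.mem_cons.mp hc' with rfl | hc''
        · exact absurd hv' hv
        · exact ih2 c' hc'' hv'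
      · intro h
        obtain ⟨h1, h2⟩ := ih4 h
        refine ⟨h1, fun c' hc' => ?_⟩
        rcases List.mem_cons.mp hc' with rfl | hc''
        · simpa using hv
        · exact h2 c' hc''

theorem alt_le (point : Int × Int) (grid : List (List Int)) {c : Int × Int}
    (hc : inBox grid c) (hl : gval grid c ≠ 0) :
    altMin point grid ≤ mdist point c ∧ altMin point grid ≠ -1 := by
  obtain ⟨-, h2, -, h4⟩ := foldl_gstep_spec point grid (cells grid) (-1) (Or.inl rfl)
  unfold altMin
  have hm := (mem_cells grid c).mpr hc
  exact ⟨h2 c hm hl, fun h => hl ((h4 h).2 c hm)⟩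

theorem alt_provenance (point : Int × Int) (grid : List (List Int)) :
    altMin point grid = -1 ∨
      ∃ c, inBox grid c ∧ gval grid c ≠ 0 ∧ altMin point grid = mdist point c := by
  obtain ⟨h1, -, -, -⟩ := foldl_gstep_spec point grid (cells grid) (-1) (Or.inl rfl)
  unfold altMin
  rcases h1 with h | ⟨c, hc, hv, he⟩
  · exact Or.inl h
  · exact Or.inr ⟨c, (mem_cells grid c).mp hc, hv, he⟩

theorem alt_of_no_land (point : Int × Int) (grid : List (List Int))
    (h : ∀ c, inBox grid c → gval grid c = 0) : altMin point grid = -1 := by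
  rcases alt_provenance point grid with h1 | ⟨c, hc, hv, -⟩
  · exact h1
  · exact absurd (h c hc) hv

-- ===== A-side: BFS invariant =====

structure BfsInv (p : Int × Int) (grid : List (List Int)) (d : Int)
    (Q1 Q2 V : List (Int × Int)) : Prop where
  done : 1 ≤ d
  q1 : ∀ c ∈ Q1, inBox grid c ∧ mdist p c = d
  q2 : ∀ c ∈ Q2, inBox grid c ∧ mdist p c = d + 1
  cover : ∀ c, inBox grid c → mdist p c ≤ d → c ∈ V
  vmax : ∀ c ∈ V, mdist p c ≤ d + 1
  frontier : ∀ c ∈ V, mdist p c = d + 1 → c ∈ Q2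
  popped_water : ∀ c ∈ V, c ∉ Q1 → c ∉ Q2 → gval grid c = 0
  popped_nbrs : ∀ c ∈ V, c ∉ Q1 → c ∉ Q2 → ∀ z, adj c z → inBox grid z → z ∈ V
  qsub : ∀ c, c ∈ Q1 ∨ c ∈ Q2 → c ∈ V
  qnd : (Q1 ++ Q2).Nodup

theorem adj_iff (x y : Int) (z : Int × Int) :
    (∃ nb ∈ [((1 : Int), (0 : Int)), (-1, 0), (0, 1), (0, -1)], z = (x + nb.1, y + nb.2)) ↔
      adj (x, y) z := by
  obtain ⟨u, v⟩ := z
  unfold adj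
  simp only [List.mem_cons, List.not_mem_nil, or_false, Prod.mk.injEq]
  constructor
  · rintro ⟨nb, hnb, h1, h2⟩
    rcases hnb with rfl | rfl | rfl | rfl <;> simp only [] at h1 h2 <;> omega
  · rintro (⟨h1, h2⟩ | ⟨h1, h2⟩ | ⟨h1, h2⟩ | ⟨h1, h2⟩)
    · exact ⟨(1, 0), Or.inl rfl, by omega, by omega⟩
    · exact ⟨(-1, 0), Or.inr (Or.inl rfl), by omega, by omega⟩
    · exact ⟨(0, 1), Or.inr (Or.inr (Or.inl rfl)), by omega, by omega⟩
    · exact ⟨(0, -1), Or.inr (Or.inr (Or.inr rfl)), by omega, by omega⟩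

theorem inv_levelup (p : Int × Int) (grid : List (List Int)) (d : Int)
    (Q2 V : List (Int × Int)) (hp : startOK grid p) (h : BfsInv p grid d [] Q2 V) :
    BfsInv p grid (d + 1) Q2 [] V := by
  refine ⟨by have := h.done; omega, h.q2, by simp, ?_, ?_, ?_, ?_, ?_, ?_, ?_⟩
  · intro c hc hle
    by_cases hle' : mdist p c ≤ d
    · exact h.cover c hc hle'
    · obtain ⟨z, hadj, hzbox, hzd⟩ := toward grid p hp hc (by have := h.done; omega)
      have hzV : z ∈ V := h.cover z hzbox (by omega)
      have hz2 : z ∉ Q2 := fun hm => by have := (h.q2 z hm).2; omega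
      exact h.popped_nbrs z hzV (by simp) hz2 c (adj_symm hadj) hc
  · intro c hc; have := h.vmax c hc; omega
  · intro c hc hd
    exact absurd (h.vmax c hc) (by omega)
  · intro c hc h1 h2
    exact h.popped_water c hc (by simp) h1
  · intro c hc h1 h2
    exact h.popped_nbrs c hc (by simp) h1
  · intro c hc
    rcases hc with hc | hc
    · exact h.qsub c (Or.inr hc)
    · simp at hc
  · simpa using h.qnd

theorem inv_empty (p : Int × Int) (grid : List (List Int)) (d : Int)
    (V : List (Int × Int)) (hp : startOK grid p) (h : BfsInv p grid d [] [] V) :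
    ∀ c, inBox grid c → gval grid c = 0 := by
  intro c hc
  have hle : mdist p c ≤ d := by
    by_contra hgt
    obtain ⟨c', hc'box, hc'd⟩ :=
      exists_at_dist grid p hp hc (d + 1) (by have := h.done; omega) (by omega)
    obtain ⟨z, hadj, hzbox, hzd⟩ := toward grid p hp hc'box (by have := h.done; omega)
    have hzV : z ∈ V := h.cover z hzbox (by omega)
    have hcV : c' ∈ V := h.popped_nbrs z hzV (by simp) (by simp) c' (adj_symm hadj) hc'box
    have := h.frontier c' hcV hc'd
    simp at this
  exact h.popped_water c (h.cover c hc hle) (by simp) (by simp)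

theorem inv_pop (p : Int × Int) (grid : List (List Int)) (d : Int) (x y : Int)
    (T Q2 V : List (Int × Int)) (h : BfsInv p grid d ((x, y) :: T) Q2 V)
    (hw : gval grid (x, y) = 0) :
    ∃ news : List (Int × Int),
      [((1 : Int), (0 : Int)), (-1, 0), (0, 1), (0, -1)].foldl (bfsStep grid x y) (T ++ Q2, V)
        = (T ++ Q2 ++ news, V ++ news) ∧
      BfsInv p grid d T (Q2 ++ news) (V ++ news) ∧
      news.Nodup ∧ (∀ c ∈ news, c ∉ V) := by
  obtain ⟨news, hfold, hnd, hmem, hcov⟩ :=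
    foldStep_spec grid x y [((1 : Int), (0 : Int)), (-1, 0), (0, 1), (0, -1)] (T ++ Q2) V
  obtain ⟨hxybox, hxyd⟩ := h.q1 (x, y) (List.mem_cons_self ..)
  have hnews : ∀ c ∈ news, inBox grid c ∧ mdist p c = d + 1 ∧ c ∉ V := by
    intro c hc
    obtain ⟨hnv, hbox, hnb⟩ := hmem c hc
    have hadj : adj (x, y) c := (adj_iff x y c).mp hnb
    rcases adj_mdist p hadj with hd1 | hd1
    · exact ⟨hbox, by omega, hnv⟩
    · exact absurd (h.cover c hbox (by omega)) hnv
  have htq : ∀ c, c ∈ T ∨ c ∈ Q2 → c ∈ V := by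
    intro c hc
    rcases hc with hc | hc
    · exact h.qsub c (Or.inl (List.mem_cons_of_mem _ hc))
    · exact h.qsub c (Or.inr hc)
  refine ⟨news, hfold, ⟨h.done, ?_, ?_, ?_, ?_, ?_, ?_, ?_, ?_, ?_⟩, hnd,
    fun c hc => (hnews c hc).2.2⟩
  · exact fun c hc => h.q1 c (List.mem_cons_of_mem _ hc)
  · intro c hc
    rcases List.mem_append.mp hc with hc | hc
    · exact h.q2 c hc
    · exact ⟨(hnews c hc).1, (hnews c hc).2.1⟩
  · exact fun c hc hle => List.mem_append_left _ (h.cover c hc hle)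
  · intro c hc
    rcases List.mem_append.mp hc with hc | hc
    · exact h.vmax c hc
    · have := (hnews c hc).2.1; omega
  · intro c hc hd1
    rcases List.mem_append.mp hc with hc | hc
    · exact List.mem_append_left _ (h.frontier c hc hd1)
    · exact List.mem_append_right _ hc
  · intro c hc hT hQ2n
    have hcnews : c ∉ news := fun hm => hQ2n (List.mem_append_right _ hm)
    have hcV : c ∈ V := by
      rcases List.mem_append.mp hc with hc | hc
      · exact hc
      · exact absurd hc hcnews
    by_cases hcxy : c = (x, y)
    · rw [hcxy]; exact hw
    · exact h.popped_water c hcV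
        (fun hm => by rcases List.mem_cons.mp hm with hm | hm; exact hcxy hm; exact hT hm)
        (fun hm => hQ2n (List.mem_append_left _ hm))
  · intro c hc hT hQ2n z hadj hzbox
    have hcnews : c ∉ news := fun hm => hQ2n (List.mem_append_right _ hm)
    have hcV : c ∈ V := by
      rcases List.mem_append.mp hc with hc | hc
      · exact hc
      · exact absurd hc hcnews
    by_cases hcxy : c = (x, y)
    · subst hcxy
      obtain ⟨nb, hnb, heq⟩ := (adj_iff x y z).mpr hadj
      rw [heq]
      exact hcov nb hnb (heq ▸ hzbox)
    · exact List.mem_append_left _ (h.popped_nbrs c hcV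
        (fun hm => by rcases List.mem_cons.mp hm with hm | hm; exact hcxy hm; exact hT hm)
        (fun hm => hQ2n (List.mem_append_left _ hm)) z hadj hzbox)
  · intro c hc
    rcases hc with hc | hc
    · exact List.mem_append_left _ (htq c (Or.inl hc))
    · rcases List.mem_append.mp hc with hc | hc
      · exact List.mem_append_left _ (htq c (Or.inr hc))
      · exact List.mem_append_right _ hc
  · rw [← List.append_assoc]
    have hold : (T ++ Q2).Nodup := by
      have hq := h.qnd
      rw [List.cons_append] at hq
      exact hq.of_cons
    refine List.nodup_append.mpr ⟨hold, hnd, ?_⟩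
    intro a ha1 b hb2 hab
    subst hab
    exact (hnews a hb2).2.2 (htq a (List.mem_append.mp ha1))

theorem gval_def (grid : List (List Int)) (x y : Int) :
    (PySem.List.pyGet? ((PySem.List.pyGet? grid x).getD []) y).getD 0 = gval grid (x, y) := rfl

theorem land_case (p : Int × Int) (grid : List (List Int)) (d : Int) (x y : Int)
    (T Q2 V : List (Int × Int)) (h : BfsInv p grid d ((x, y) :: T) Q2 V)
    (hv : gval grid (x, y) ≠ 0) : altMin p grid = mdist p (x, y) := by
  obtain ⟨hxybox, hxyd⟩ := h.q1 (x, y) (List.mem_cons_self ..)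
  obtain ⟨hub, hne⟩ := alt_le p grid hxybox hv
  rcases alt_provenance p grid with h1 | ⟨c, hcbox, hcl, he⟩
  · exact absurd h1 hne
  · have hge : d ≤ mdist p c := by
      by_contra hlt
      have hcV : c ∈ V := h.cover c hcbox (by omega)
      have hc1 : c ∉ (x, y) :: T := fun hm => by have := (h.q1 c hm).2; omega
      have hc2 : c ∉ Q2 := fun hm => by have := (h.q2 c hm).2; omega
      exact hcl (h.popped_water c hcV hc1 hc2)
    omega

theorem pop_case (p : Int × Int) (grid : List (List Int)) (d : Int) (x y : Int)
    (T Q2 V : List (Int × Int)) (hInv : BfsInv p grid d ((x, y) :: T) Q2 V)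
    (ih : ∀ Q' V' : List (Int × Int),
      2 * ((boxFinset grid.length) \ V'.toFinset).card + Q'.length <
        2 * ((boxFinset grid.length) \ V.toFinset).card + ((x, y) :: (T ++ Q2)).length →
      ∀ (d' : Int) (Q1' Q2' : List (Int × Int)), Q' = Q1' ++ Q2' →
        BfsInv p grid d' Q1' Q2' V' → bfsLoop p grid Q' V' = altMin p grid) :
    bfsLoop p grid ((x, y) :: (T ++ Q2)) V = altMin p grid := by
  rw [bfsLoop, gval_def]
  by_cases hv : gval grid (x, y) ≠ 0
  · rw [if_pos hv]
    exact (land_case p grid d x y T Q2 V hInv hv).symm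
  · rw [if_neg hv]
    rw [not_not] at hv
    obtain ⟨news, hfold, hInv2, hnd, hnv⟩ := inv_pop p grid d x y T Q2 V hInv hv
    have hbox : ∀ c ∈ news, c ∈ boxFinset grid.length := fun c hc =>
      (mem_boxFinset grid c).mpr (hInv2.q2 c (List.mem_append_right _ hc)).1
    have hcard := card_sdiff_append (boxFinset grid.length) V news hnd hnv hbox
    simp only [hfold]
    exact ih (T ++ Q2 ++ news) (V ++ news)
      (by simp only [List.length_append, List.length_cons]; omega)
      d T (Q2 ++ news) (by rw [List.append_assoc]) hInv2

theorem loop_eq (p : Int × Int) (grid : List (List Int)) (hp : startOK grid p) :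
    ∀ (m : Nat) (Q V : List (Int × Int)) (d : Int) (Q1 Q2 : List (Int × Int)),
      2 * ((boxFinset grid.length) \ V.toFinset).card + Q.length = m →
      Q = Q1 ++ Q2 → BfsInv p grid d Q1 Q2 V →
      bfsLoop p grid Q V = altMin p grid := by
  intro m
  induction m using Nat.strong_induction_on with
  | _ m ihm =>
    intro Q V d Q1 Q2 hm hq hInv
    rcases Q1 with _ | ⟨⟨x, y⟩, T⟩
    · rcases Q2 with _ | ⟨⟨x, y⟩, t⟩
      · simp only [List.nil_append] at hq
        subst hq
        rw [bfsLoop]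
        exact (alt_of_no_land p grid (inv_empty p grid d V hp hInv)).symm
      · simp only [List.nil_append] at hq
        subst hq
        have hInv2 := inv_levelup p grid d ((x, y) :: t) V hp hInv
        rw [show ((x, y) :: t : List (Int × Int)) = (x, y) :: (t ++ []) by simp]
        apply pop_case p grid (d + 1) x y t [] V hInv2
        intro Q' V' hlt d' Q1' Q2' hq' hInv3
        refine ihm _ ?_ Q' V' d' Q1' Q2' rfl hq' hInv3
        simp only [List.length_append, List.length_cons, List.length_nil] at hm hlt ⊢
        omega
    · subst hq
      rw [show (((x, y) :: T : List (Int × Int)) ++ Q2) = (x, y) :: (T ++ Q2) by simp]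
      apply pop_case p grid d x y T Q2 V hInv
      intro Q' V' hlt d' Q1' Q2' hq' hInv3
      refine ihm _ ?_ Q' V' d' Q1' Q2' rfl hq' hInv3
      simp only [List.length_append, List.length_cons] at hm hlt ⊢
      omega

theorem mdist_one_adj (p c : Int × Int) (h : mdist p c = 1) : adj p c := by
  obtain ⟨a, b⟩ := c; obtain ⟨px, py⟩ := p
  unfold adj
  unfold mdist at h
  simp only [Prod.mk.injEq] at *
  omega

theorem adj_mdist_one (p : Int × Int) {c : Int × Int} (h : adj p c) : mdist p c = 1 := by
  have h0 : mdist p p = 0 := by unfold mdist; omega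
  have := adj_mdist p h
  have := mdist_nonneg p c
  omega

-- the state after A pops a water start cell satisfies the invariant at level 1
theorem bfsInv_start (p : Int × Int) (grid : List (List Int)) (hp : startOK grid p)
    (hw : gval grid p = 0) :
    ∃ news : List (Int × Int),
      [((1 : Int), (0 : Int)), (-1, 0), (0, 1), (0, -1)].foldl (bfsStep grid p.1 p.2) ([], [p])
        = ([] ++ news, [p] ++ news) ∧
      BfsInv p grid 1 news [] ([p] ++ news) := by
  obtain ⟨news, hfold, hnd, hmem, hcov⟩ :=
    foldStep_spec grid p.1 p.2 [((1 : Int), (0 : Int)), (-1, 0), (0, 1), (0, -1)] [] [p]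
  have hnews : ∀ c ∈ news, inBox grid c ∧ mdist p c = 1 ∧ c ∉ ([p] : List (Int × Int)) := by
    intro c hc
    obtain ⟨hnv, hbox, hnb⟩ := hmem c hc
    have hadj : adj p c := by
      have := (adj_iff p.1 p.2 c).mp hnb
      simpa using this
    exact ⟨hbox, adj_mdist_one p hadj, hnv⟩
  refine ⟨news, hfold, ⟨le_refl 1, ?_, by simp, ?_, ?_, ?_, ?_, ?_, ?_, ?_⟩⟩
  · exact fun c hc => ⟨(hnews c hc).1, (hnews c hc).2.1⟩
  · intro c hc hle
    have h0 := mdist_nonneg p c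
    by_cases he : mdist p c = 0
    · have := (mdist_eq_zero p c).mp he
      subst this
      exact List.mem_append_left _ (by simp)
    · have h1 : mdist p c = 1 := by omega
      have hadj : adj p c := mdist_one_adj p c h1
      obtain ⟨nb, hnb, heq⟩ := (adj_iff p.1 p.2 c).mpr (by simpa using hadj)
      rw [heq]
      exact hcov nb hnb (heq ▸ hc)
  · intro c hc
    rcases List.mem_append.mp hc with hc | hc
    · rw [List.mem_singleton] at hc
      have h0 : mdist p c = 0 := by rw [hc]; unfold mdist; omega
      omega
    · have := (hnews c hc).2.1; omega
  · intro c hc hd1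
    exfalso
    rcases List.mem_append.mp hc with hc | hc
    · rw [List.mem_singleton] at hc
      have h0 : mdist p c = 0 := by rw [hc]; unfold mdist; omega
      omega
    · have := (hnews c hc).2.1; omega
  · intro c hc h1 h2
    have hcp : c = p := by
      rcases List.mem_append.mp hc with hc | hc
      · simpa using hc
      · exact absurd hc h1
    rw [hcp]; exact hw
  · intro c hc h1 h2 z hadj hzbox
    have hcp : c = p := by
      rcases List.mem_append.mp hc with hc | hc
      · simpa using hc
      · exact absurd hc h1
    rw [hcp] at hadj
    obtain ⟨nb, hnb, heq⟩ := (adj_iff p.1 p.2 z).mpr (by simpa using hadj)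
    rw [heq]
    exact hcov nb hnb (heq ▸ hzbox)
  · intro c hc
    rcases hc with hc | hc
    · exact List.mem_append_right _ hc
    · simp at hc
  · simpa using hnd

-- ===== VERDICT (by name: the statement is the Claim_ definition above) =====
theorem bfs_spec : Claim_equal_bfs := by
  intro point grid _ hpre
  obtain ⟨px, py⟩ := point
  show bfs (px, py) grid = bfs_alt (px, py) grid
  unfold bfs
  rw [show PySem.Set.ofList [((px, py) : Int × Int)] = [(px, py)] from rfl]
  rw [bfsLoop, gval_def]
  by_cases hv : gval grid (px, py) ≠ 0
  · rw [if_pos hv]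
    have hb : bfs_alt (px, py) grid = 0 := by
      unfold bfs_alt
      rw [show (PySem.List.pyGet? ((PySem.List.pyGet? grid ((px, py) : Int × Int).1).getD [])
        ((px, py) : Int × Int).2).getD 0 = gval grid (px, py) from rfl, if_pos hv]
    rw [hb]
    simp only []
    omega
  · rw [if_neg hv]
    rw [not_not] at hv
    have hstart : startOK grid (px, py) := by
      rcases hpre with hl | ⟨h1, h2, h3, h4, h5, -⟩
      · exact absurd (gval_def grid px py ▸ hl) (by simp [hv])
      · exact ⟨h1, h2, h3, h4, h5⟩
    obtain ⟨news, hfold, hInv⟩ := bfsInv_start (px, py) grid hstart hv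
    simp only [] at hfold
    simp only [hfold]
    rw [alt_eq_water (px, py) grid hv]
    exact loop_eq (px, py) grid hstart _ ([] ++ news) ([(px, py)] ++ news) 1 news []
      rfl (by simp) hInv
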